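-- pv_equiv track=rewrite | github.com/buckley-w-david/aoc-2021 | fast/day3/day3.py | part_two
-- ===== SOURCE A (Python) =====
-- def part_two(lines):
--     ogr = lines[:]
--     idx = 0
--     while len(ogr) != 1:
--         ones = 0
--         zeros = 0
--         for line in ogr:
--             if line[idx] == '1':
--                 ones += 1
--             elif line[idx] == '0':
--                 zeros += 1
--         most_common = '1' if ones >= zeros else '0'
--         ogr = [l for l in ogr if l[idx] == most_common]
--         idx += 1
--
--     co2 = lines[:]
--     idx = 0
--     while len(co2) != 1:
--         ones = 0
--         zeros = 0
--         for line in co2: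
--             if line[idx] == '1':
--                 ones += 1
--             elif line[idx] == '0':
--                 zeros += 1
--         least_common = '0' if ones >= zeros else '1'
--         co2 = [l for l in co2 if l[idx] == least_common]
--         idx += 1
--
--     ogr = int(''.join(ogr), 2)
--     co2 = int(''.join(co2), 2)
--     return ogr*co2
-- ===== SOURCE B (Python) =====
-- def part_two(lines):
--     # One counted binary trie built in a single pass (count = lines through the
--     # node, parallel '0'/'1' children); each rating is one descent: majority
--     # child for oxygen, minority for CO2 (ties as in the puzzle), stopping when
--     # one candidate remains, which is then found by its bit prefix.
--     def new():
--         return [0, None, None]  # [count, child '0', child '1']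
--
--     root = new()
--     for line in lines:
--         node = root
--         node[0] += 1
--         for ch in line:
--             if ch == '0':
--                 b = 1
--             elif ch == '1':
--                 b = 2
--             else:
--                 break  # a non-bit character: this line never matches a kept bit again
--             if node[b] is None:
--                 node[b] = new()
--             node = node[b]
--             node[0] += 1
--
--     def rate(keep_most_common):
--         node, bits = root, []
--         while node[0] > 1:
--             c0 = node[1][0] if node[1] else 0
--             c1 = node[2][0] if node[2] else 0
--             if keep_most_common:
--                 b = 1 if c1 >= c0 else 0
--             else:
--                 b = 0 if c1 >= c0 else 1
--             bits.append('1' if b else '0')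
--             node = node[1 + b] or new()
--         prefix = ''.join(bits)
--         survivor = next(l for l in lines if l.startswith(prefix))
--         return int(survivor, 2)
--
--     return rate(True) * rate(False)
-- ===== Notes on version B (the rewrite author's own statement) =====
-- stated objective: alternative
-- what changed: Replaces the two repeated filter-the-candidate-list loops with one counted binary trie built in a single pass, from which both ratings are read off by one descent each (majority child for oxygen, minority for CO2), the surviving line then being found by its bit prefix.
import Mathlib
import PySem

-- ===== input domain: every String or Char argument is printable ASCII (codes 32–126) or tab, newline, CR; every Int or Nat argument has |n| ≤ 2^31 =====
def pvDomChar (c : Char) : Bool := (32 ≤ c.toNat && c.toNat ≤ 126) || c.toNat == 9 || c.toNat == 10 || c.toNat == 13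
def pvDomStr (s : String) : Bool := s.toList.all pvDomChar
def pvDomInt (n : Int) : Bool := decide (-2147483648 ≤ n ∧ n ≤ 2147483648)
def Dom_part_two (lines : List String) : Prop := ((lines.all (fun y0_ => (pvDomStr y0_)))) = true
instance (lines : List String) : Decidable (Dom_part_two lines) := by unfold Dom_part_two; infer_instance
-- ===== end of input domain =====

-- B builds one counted binary trie in a single pass and reads both ratings off it by one
-- descent each, instead of A's repeated filtering of the candidate list; equal on Pre_.

-- ---- shared helper: int(s, 2), ported by hand (no PySem primitive): strip whitespace,
-- optional sign, optional 0b/0B prefix, '0'/'1' digits with single underscores between;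
-- exact on Dom strings; returns none exactly where Python raises ValueError.
def pvWsC (c : Char) : Bool :=
  c == ' ' || c == '\t' || c == '\n' || c == '\r' || c == Char.ofNat 11 || c == Char.ofNat 12

def pvBit (c : Char) : Bool := c == '0' || c == '1'

def pvStrip (l : List Char) : List Char :=
  ((l.dropWhile pvWsC).reverse.dropWhile pvWsC).reverse

-- after the first digit: digits with single underscores strictly between digits
def pvWfRest : List Char → Bool
  | [] => true
  | '_' :: c :: r => pvBit c && pvWfRest r
  | '_' :: [] => false
  | c :: r => pvBit c && pvWfRest r

def pvWf : List Char → Bool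
  | [] => false
  | c :: r => pvBit c && pvWfRest r

def pvDigitsVal (l : List Char) : Int :=
  (l.filter (fun c => !(c == '_'))).foldl (fun a c => 2 * a + (if c = '1' then 1 else 0)) 0

def pvInt2? (l : List Char) : Option Int :=
  let t0 := pvStrip l
  let sgn : Int := match t0 with | '-' :: _ => -1 | _ => 1
  let t1 := match t0 with | '+' :: r => r | '-' :: r => r | r => r
  let t2 := match t1 with
    | '0' :: 'b' :: r => (match r with | '_' :: r' => r' | r' => r')
    | '0' :: 'B' :: r => (match r with | '_' :: r' => r' | r' => r')
    | r => r
  if pvWf t2 then some (sgn * pvDigitsVal t2) else none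

-- ===== PORT A =====
-- the ones/zeros counting pass of one while-iteration (line[idx] = pyGet?, if/elif kept;
-- pyGet? = none, where Python raises IndexError, is counted as neither — outside Pre_)
def pvCount (cs : List (List Char)) (idx : Nat) : Nat × Nat :=
  cs.foldl (fun p l =>
    if PySem.List.pyGet? l (idx : Int) == some '1' then (p.1 + 1, p.2)
    else if PySem.List.pyGet? l (idx : Int) == some '0' then (p.1, p.2 + 1)
    else p) (0, 0)

-- most_common ('1' on a tie) resp. least_common ('0' on a tie) from (ones, zeros)
def pvMC (hi : Bool) (oz : Nat × Nat) : Char :=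
  if hi then (if oz.2 ≤ oz.1 then '1' else '0') else (if oz.2 ≤ oz.1 then '0' else '1')

-- A's while loop (hi = true: oxygen, keep most common; hi = false: CO2, keep least common);
-- fuel only makes the loop total: under Pre_ the loop stops within (total length) iterations.
def pvLoop (hi : Bool) : Nat → List (List Char) → Nat → List (List Char)
  | fuel, cs, idx =>
    if cs.length = 1 then cs
    else
      match fuel with
      | 0 => cs
      | fuel + 1 =>
        pvLoop hi fuel
          (cs.filter (fun l => PySem.List.pyGet? l (idx : Int) == some (pvMC hi (pvCount cs idx))))
          (idx + 1)

def part_two (lines : List String) : Int :=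
  let ls := lines.map String.toList
  let fuel := (ls.map List.length).sum
  (pvInt2? (pvLoop true fuel ls 0).flatten).getD 0
    * (pvInt2? (pvLoop false fuel ls 0).flatten).getD 0

-- ===== PORT B =====
-- trie node: how many lines pass through it, and the '0'/'1' children (nil = Python's None)
inductive PvTrie : Type
  | nil : PvTrie
  | mk : Nat → PvTrie → PvTrie → PvTrie
deriving DecidableEq

def pvTC : PvTrie → Nat | PvTrie.nil => 0 | PvTrie.mk c _ _ => c
def pvT0 : PvTrie → PvTrie | PvTrie.nil => PvTrie.nil | PvTrie.mk _ t0 _ => t0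
def pvT1 : PvTrie → PvTrie | PvTrie.nil => PvTrie.nil | PvTrie.mk _ _ t1 => t1

-- insert one line: bump each node on the line's bit path; stop at a non-bit character
def pvIns : PvTrie → List Char → PvTrie
  | t, [] => PvTrie.mk (pvTC t + 1) (pvT0 t) (pvT1 t)
  | t, c :: cs =>
      if c = '0' then PvTrie.mk (pvTC t + 1) (pvIns (pvT0 t) cs) (pvT1 t)
      else if c = '1' then PvTrie.mk (pvTC t + 1) (pvT0 t) (pvIns (pvT1 t) cs)
      else PvTrie.mk (pvTC t + 1) (pvT0 t) (pvT1 t)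

def pvBuild (ds : List (List Char)) : PvTrie := ds.foldl pvIns PvTrie.nil

-- Source B's rate() loop: the chosen bit prefix (majority child for hi, else minority)
def pvRate (hi : Bool) : PvTrie → List Char
  | PvTrie.nil => []
  | PvTrie.mk c t0 t1 =>
      if c ≤ 1 then []
      else if (if hi then decide (pvTC t0 ≤ pvTC t1) else decide (pvTC t1 < pvTC t0)) = true
           then '1' :: pvRate hi t1
           else '0' :: pvRate hi t0

-- survivor = first line with the chosen prefix, then int(survivor, 2)
-- (find? = none: Python raises StopIteration; pvInt2? = none: ValueError — outside Pre_)
def pvRateVal (hi : Bool) (ls : List (List Char)) (root : PvTrie) : Int :=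
  match ls.find? (fun l => (pvRate hi root).isPrefixOf l) with
  | some s => (pvInt2? s).getD 0
  | none => 0

def part_two_alt (lines : List String) : Int :=
  let ls := lines.map String.toList
  let root := pvBuild ls
  pvRateVal true ls root * pvRateVal false ls root

-- ===== PRECONDITION & SPEC =====
-- how many lines have prefix p
def pvCnt (ds : List (List Char)) (p : List Char) : Nat :=
  (ds.filter (fun d => p.isPrefixOf d)).length

-- the bit A's pass keeps below prefix p: for oxygen (hi) the majority bit ('1' on a tie),
-- for CO2 the minority bit ('0' on a tie) — A's exact tie rules
def pvPick (hi : Bool) (ds : List (List Char)) (p : List Char) : Char :=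
  if pvCnt ds (p ++ ['0']) ≤ pvCnt ds (p ++ ['1']) then (if hi then '1' else '0')
  else (if hi then '0' else '1')

-- p lies on pass hi's selection path: below every proper prefix (still shared by ≥ 2
-- lines) the pass keeps exactly p's next character
def pvVisitedB (hi : Bool) (ds : List (List Char)) (p : List Char) : Bool :=
  (List.range p.length).all (fun k =>
    decide (2 ≤ pvCnt ds (p.take k)) && (p.getD k ' ' == pvPick hi ds (p.take k)))

-- every on-path prefix shared by ≥ 2 lines ends no line (A: IndexError) and its kept
-- side is nonempty (A: the filter empties the list and the loop never stops)
def pvSafeB (hi : Bool) (ds : List (List Char)) : Bool :=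
  ds.all (fun l => (List.range (l.length + 1)).all (fun k =>
    !(pvVisitedB hi ds (l.take k)) || !(decide (2 ≤ pvCnt ds (l.take k))) ||
      (!(decide ((l.take k) ∈ ds)) &&
        decide (1 ≤ pvCnt ds (l.take k ++ [pvPick hi ds (l.take k)])))))

-- the pass's surviving line (the unique line at the first on-path prefix shared by
-- exactly one line) is a valid base-2 int literal (A: int(·, 2) raises ValueError)
def pvSurvOkB (hi : Bool) (ds : List (List Char)) : Bool :=
  ds.all (fun l => (List.range (l.length + 1)).all (fun k =>
    !(pvVisitedB hi ds (l.take k)) || !(pvCnt ds (l.take k) == 1) || (pvInt2? l).isSome))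

-- Pre_ holds exactly when A returns: it admits every input on which A returns a value and
-- excludes exactly those on which A raises (IndexError from a line exhausted while its
-- prefix is still shared, ValueError from int(·,2) on the survivor) or loops forever
-- (the empty list, or a filter that empties its candidate list).
def Pre_part_two (lines : List String) : Prop :=
  lines ≠ [] ∧
  pvSafeB true (lines.map String.toList) = true ∧
  pvSafeB false (lines.map String.toList) = true ∧
  pvSurvOkB true (lines.map String.toList) = true ∧
  pvSurvOkB false (lines.map String.toList) = true

instance (lines : List String) : Decidable (Pre_part_two lines) := by
  unfold Pre_part_two; infer_instance

def pvWitness_part_two : List String := ["01", "10"]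

def Spec_part_two (lines : List String) (out : Int) : Prop := out = part_two_alt lines
instance (lines : List String) (out : Int) : Decidable (Spec_part_two lines out) := by
  unfold Spec_part_two; infer_instance

-- ===== CLAIM (what is proved, stated in full; the proofs are below) =====
def Claim_equal_part_two : Prop :=
  ∀ (lines : List String), Dom_part_two lines → Pre_part_two lines →
    Spec_part_two lines (part_two lines)

-- ===== LEMMAS AND PROOFS =====

-- Prop forms of the path predicates, for the induction
def pvVisited (hi : Bool) (ds : List (List Char)) (p : List Char) : Prop :=
  ∀ k, k < p.length → 2 ≤ pvCnt ds (p.take k) ∧ p.getD k ' ' = pvPick hi ds (p.take k)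

def pvSafe (hi : Bool) (ds : List (List Char)) : Prop :=
  ∀ p, pvVisited hi ds p → 2 ≤ pvCnt ds p →
    ¬ p ∈ ds ∧ 1 ≤ pvCnt ds (p ++ [pvPick hi ds p])

theorem pvIsPrefixOf_cc (a b : Char) (l1 l2 : List Char) :
    List.isPrefixOf (a :: l1) (b :: l2) = (a == b && l1.isPrefixOf l2) := rfl

theorem pvCnt_nil (ds : List (List Char)) : pvCnt ds [] = ds.length := by
  simp [pvCnt, List.isPrefixOf]

theorem pvCnt_cons_tail (c : Char) (p : List Char) (ds : List (List Char)) :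
    pvCnt ((ds.filter (fun d => d.head? == some c)).map List.tail) p = pvCnt ds (c :: p) := by
  induction ds with
  | nil => rfl
  | cons d ds ih =>
    unfold pvCnt at ih ⊢
    cases d with
    | nil => simpa using ih
    | cons x xs =>
      by_cases hx : x = c
      · subst hx
        simp only [List.filter_cons, List.head?_cons, pvIsPrefixOf_cc, beq_self_eq_true,
          Bool.true_and, if_true]
        by_cases hp : p.isPrefixOf xs = true
        · simp [hp] at ih ⊢; omega
        · simp only [Bool.not_eq_true] at hp
          simp [hp] at ih ⊢; omega
      · have hb : (x == c) = false := by simp [hx]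
        have hb' : (c == x) = false := by
          simp [show c ≠ x from fun h => hx h.symm]
        simp only [List.filter_cons, List.head?_cons, pvIsPrefixOf_cc]
        simp [hb, hb', ih]

theorem pvMem_cons_tail (c : Char) (p : List Char) (ds : List (List Char)) :
    p ∈ (ds.filter (fun d => d.head? == some c)).map List.tail ↔ c :: p ∈ ds := by
  constructor
  · intro h
    obtain ⟨d, hd, rfl⟩ := List.mem_map.1 h
    have hd' := List.mem_filter.1 hd
    cases d with
    | nil => simp at hd'
    | cons x xs =>
      have : x = c := by simpa using hd'.2
      subst this
      simpa using hd'.1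
  · intro h
    exact List.mem_map.2 ⟨c :: p, List.mem_filter.2 ⟨h, by simp⟩, rfl⟩

theorem pvCnt_single (ds : List (List Char)) (c : Char) :
    pvCnt ds [c] = ds.countP (fun d => d.head? == some c) := by
  induction ds with
  | nil => rfl
  | cons d ds ih =>
    unfold pvCnt at ih ⊢
    cases d with
    | nil => simpa [List.countP_cons] using ih
    | cons x xs =>
      by_cases hx : x = c
      · subst hx
        simp [List.filter_cons, List.countP_cons, pvIsPrefixOf_cc, List.isPrefixOf, ih]
      · have hb : (x == c) = false := by simp [hx]
        have hb' : (c == x) = false := by simp [show c ≠ x from fun h => hx h.symm]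
        simp [List.filter_cons, List.countP_cons, pvIsPrefixOf_cc, hb, hb', ih]

theorem pvCnt_pos_ex {ds : List (List Char)} {p : List Char} (hp : 1 ≤ pvCnt ds p) :
    ∃ l ∈ ds, p = l.take p.length ∧ p.length ≤ l.length := by
  have hne : (ds.filter (fun d => p.isPrefixOf d)) ≠ [] := by
    intro he; rw [pvCnt, he] at hp; simp at hp
  obtain ⟨d, hd⟩ := List.exists_mem_of_ne_nil _ hne
  have hd' := List.mem_filter.1 hd
  have hpre : p <+: d := by
    have := hd'.2; simpa [List.isPrefixOf_iff_prefix] using this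
  have hlen : p.length ≤ d.length := hpre.length_le
  have htake : d.take p.length = p := by
    obtain ⟨t, rfl⟩ := hpre; simp
  exact ⟨d, hd'.1, htake.symm, hlen⟩

theorem pvVisitedB_of {hi : Bool} {ds : List (List Char)} {p : List Char}
    (h : pvVisited hi ds p) : pvVisitedB hi ds p = true := by
  unfold pvVisitedB
  rw [List.all_eq_true]
  intro k hk
  obtain ⟨h1, h2⟩ := h k (List.mem_range.1 hk)
  rw [h2]
  simp [h1]

theorem pvSafe_of_B {hi : Bool} {ds : List (List Char)} (h : pvSafeB hi ds = true) :
    pvSafe hi ds := by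
  intro p hvis hcnt
  obtain ⟨l, hl, hpl, hll⟩ := pvCnt_pos_ex (by omega : 1 ≤ pvCnt ds p)
  unfold pvSafeB at h
  rw [List.all_eq_true] at h
  have h2 := h l hl
  rw [List.all_eq_true] at h2
  have h3 := h2 p.length (List.mem_range.2 (by omega))
  rw [← hpl, pvVisitedB_of hvis] at h3
  simp [hcnt] at h3
  exact h3

theorem pvPick_cons_tail (hi : Bool) (b : Char) (ds : List (List Char)) (p : List Char) :
    pvPick hi ((ds.filter (fun d => d.head? == some b)).map List.tail) p
      = pvPick hi ds (b :: p) := by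
  have h0 := pvCnt_cons_tail b (p ++ ['0']) ds
  have h1 := pvCnt_cons_tail b (p ++ ['1']) ds
  simp only [pvPick, h0, h1, List.cons_append]
  rfl

theorem pvSafe_step {hi : Bool} {ds : List (List Char)} (h : pvSafe hi ds)
    (hroot : 2 ≤ pvCnt ds []) {b : Char} (hb : pvPick hi ds [] = b) :
    pvSafe hi ((ds.filter (fun d => d.head? == some b)).map List.tail) := by
  intro p hvis hcnt
  rw [pvCnt_cons_tail] at hcnt
  have hvis' : pvVisited hi ds (b :: p) := by
    intro k hk
    cases k with
    | zero =>
      refine ⟨by simpa using hroot, ?_⟩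
      simp [hb]
    | succ k =>
      have hk' : k < p.length := by simpa using hk
      obtain ⟨h1, h2⟩ := hvis k hk'
      rw [pvCnt_cons_tail] at h1
      rw [pvPick_cons_tail] at h2
      refine ⟨by simpa [List.take_succ_cons] using h1, ?_⟩
      rw [List.take_succ_cons, List.getD_cons_succ, h2]
  obtain ⟨hm, hc⟩ := h (b :: p) hvis' hcnt
  refine ⟨fun hmem => hm ((pvMem_cons_tail b p ds).1 hmem), ?_⟩
  rw [pvPick_cons_tail, pvCnt_cons_tail]
  simpa [List.cons_append] using hc

-- the counting pass as two countP's over the suffix heads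
theorem pvCount_fold (idx : Nat) (cs : List (List Char)) : ∀ (p : Nat × Nat),
    cs.foldl (fun p l =>
      if PySem.List.pyGet? l (idx : Int) == some '1' then (p.1 + 1, p.2)
      else if PySem.List.pyGet? l (idx : Int) == some '0' then (p.1, p.2 + 1)
      else p) p
    = (p.1 + cs.countP (fun l => PySem.List.pyGet? l (idx : Int) == some '1'),
       p.2 + cs.countP (fun l => PySem.List.pyGet? l (idx : Int) == some '0')) := by
  induction cs with
  | nil => intro p; simp
  | cons l cs ih =>
    intro p
    simp only [List.foldl_cons, List.countP_cons]
    by_cases h1 : PySem.List.pyGet? l (idx : Int) == some '1'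
    · have h0 : (PySem.List.pyGet? l (idx : Int) == some '0') = false := by
        have := beq_iff_eq.mp h1
        simp [this]
      simp only [h1, h0, if_true, ih]
      simp; omega
    · simp only [Bool.not_eq_true] at h1
      by_cases h0 : PySem.List.pyGet? l (idx : Int) == some '0'
      · simp only [h1, h0, Bool.false_eq_true, if_false, if_true, ih]
        simp; omega
      · simp only [Bool.not_eq_true] at h0
        simp only [h1, h0, Bool.false_eq_true, if_false, ih]
        simp

theorem pvCount_spec (cs : List (List Char)) (idx : Nat) :
    pvCount cs idx
      = (cs.countP (fun l => PySem.List.pyGet? l (idx : Int) == some '1'),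
         cs.countP (fun l => PySem.List.pyGet? l (idx : Int) == some '0')) := by
  unfold pvCount; rw [pvCount_fold]; simp

-- trie structure lemmas
theorem pvTC_ins (t : PvTrie) (l : List Char) : pvTC (pvIns t l) = pvTC t + 1 := by
  cases l with
  | nil => rfl
  | cons c cs =>
    by_cases h0 : c = '0' <;> by_cases h1 : c = '1' <;> simp [pvIns, pvTC, h0, h1]

theorem pvTC_foldl (ds : List (List Char)) : ∀ (t : PvTrie),
    pvTC (ds.foldl pvIns t) = pvTC t + ds.length := by
  induction ds with
  | nil => intro t; simp
  | cons d ds ih =>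
    intro t
    simp [List.foldl_cons, ih, pvTC_ins]
    omega

theorem pvTC_build (ds : List (List Char)) : pvTC (pvBuild ds) = ds.length := by
  rw [pvBuild, pvTC_foldl]; simp [pvTC]

theorem pvT1_ins (t : PvTrie) (l : List Char) :
    pvT1 (pvIns t l) = if l.head? == some '1' then pvIns (pvT1 t) l.tail else pvT1 t := by
  cases l with
  | nil => cases t <;> rfl
  | cons c cs =>
    by_cases h0 : c = '0'
    · subst h0; cases t <;> simp [pvIns, pvT1]
    · by_cases h1 : c = '1'
      · subst h1; cases t <;> simp [pvIns, pvT1, h0]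
      · have : (c == '1') = false := by simp [h1]
        cases t <;> simp [pvIns, pvT1, h0, h1, this]

theorem pvT0_ins (t : PvTrie) (l : List Char) :
    pvT0 (pvIns t l) = if l.head? == some '0' then pvIns (pvT0 t) l.tail else pvT0 t := by
  cases l with
  | nil => cases t <;> rfl
  | cons c cs =>
    by_cases h0 : c = '0'
    · subst h0; cases t <;> simp [pvIns, pvT0]
    · have : (c == '0') = false := by simp [h0]
      by_cases h1 : c = '1'
      · subst h1; cases t <;> simp [pvIns, pvT0, this]
      · cases t <;> simp [pvIns, pvT0, h0, h1, this]

theorem pvT1_foldl (ds : List (List Char)) : ∀ (t : PvTrie),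
    pvT1 (ds.foldl pvIns t) =
      ((ds.filter (fun d => d.head? == some '1')).map List.tail).foldl pvIns (pvT1 t) := by
  induction ds with
  | nil => intro t; rfl
  | cons d ds ih =>
    intro t
    simp only [List.foldl_cons, List.filter_cons]
    by_cases h : (d.head? == some '1') = true
    · simp only [h, if_true, List.map_cons, List.foldl_cons, ih, pvT1_ins]
    · simp only [Bool.not_eq_true] at h
      simp [h, ih, pvT1_ins]

theorem pvT0_foldl (ds : List (List Char)) : ∀ (t : PvTrie),
    pvT0 (ds.foldl pvIns t) =
      ((ds.filter (fun d => d.head? == some '0')).map List.tail).foldl pvIns (pvT0 t) := by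
  induction ds with
  | nil => intro t; rfl
  | cons d ds ih =>
    intro t
    simp only [List.foldl_cons, List.filter_cons]
    by_cases h : (d.head? == some '0') = true
    · simp only [h, if_true, List.map_cons, List.foldl_cons, ih, pvT0_ins]
    · simp only [Bool.not_eq_true] at h
      simp [h, ih, pvT0_ins]

theorem pvT1_build (ds : List (List Char)) :
    pvT1 (pvBuild ds)
      = pvBuild ((ds.filter (fun d => d.head? == some '1')).map List.tail) := by
  rw [pvBuild, pvT1_foldl]; rfl

theorem pvT0_build (ds : List (List Char)) :
    pvT0 (pvBuild ds)
      = pvBuild ((ds.filter (fun d => d.head? == some '0')).map List.tail) := by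
  rw [pvBuild, pvT0_foldl]; rfl

theorem pvRate_small (hi : Bool) (t : PvTrie) (h : pvTC t ≤ 1) : pvRate hi t = [] := by
  cases t with
  | nil => rfl
  | mk c t0 t1 => simp [pvTC] at h; simp [pvRate, h]

-- find? over a filter that keeps every match
theorem pvFind_filter (p q : List Char → Bool) : ∀ (cs : List (List Char)),
    (∀ l ∈ cs, p l = true → q l = true) →
    (cs.filter q).find? p = cs.find? p := by
  intro cs
  induction cs with
  | nil => intro _; rfl
  | cons l cs ih =>
    intro h
    have hrest : ∀ x ∈ cs, p x = true → q x = true := fun x hx => h x (by simp [hx])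
    by_cases hq : q l = true
    · simp only [List.filter_cons, hq, if_true]
      by_cases hp : p l = true
      · simp [List.find?_cons, hp]
      · simp only [Bool.not_eq_true] at hp
        simp [List.find?_cons, hp, ih hrest]
    · have hp : p l = false := by
        by_contra hc
        simp only [Bool.not_eq_false] at hc
        exact hq (h l (by simp) hc)
      simp only [Bool.not_eq_true] at hq
      simp [List.filter_cons, hq, List.find?_cons, hp, ih hrest]

-- the main correspondence: A's loop result is the first line carrying B's chosen bit prefix
theorem pv_main (m : Nat) :
    ∀ (cs : List (List Char)) (idx fuel : Nat) (hi : Bool) (P : List Char),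
      cs ≠ [] →
      (∀ l ∈ cs, idx ≤ l.length) →
      (∀ l ∈ cs, l.length ≤ idx + m) →
      pvSafe hi (cs.map (List.drop idx)) →
      (∀ l ∈ cs, l.take idx = P) →
      m ≤ fuel →
      ∃ w, cs.find? (fun l =>
              (P ++ pvRate hi (pvBuild (cs.map (List.drop idx)))).isPrefixOf l) = some w
        ∧ (pvLoop hi fuel cs idx).flatten = w := by
  induction m with
  | zero =>
    intro cs idx fuel hi P hne hlo hlen hsafe hpre hfu
    by_cases h1 : cs.length = 1
    · obtain ⟨u, rfl⟩ : ∃ u, cs = [u] := by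
        cases cs with
        | nil => simp at h1
        | cons a t =>
          cases t with
          | nil => exact ⟨a, rfl⟩
          | cons b t2 => simp at h1
      refine ⟨u, ?_, ?_⟩
      · have hbits : pvRate hi (pvBuild ([u].map (List.drop idx))) = [] := by
          apply pvRate_small
          rw [pvTC_build]; simp
        rw [hbits, List.append_nil]
        have : (P.isPrefixOf u) = true := by
          rw [← hpre u (by simp), List.isPrefixOf_iff_prefix]
          exact List.take_prefix idx u
        simp [List.find?_cons, this]
      · have : pvLoop hi fuel [u] idx = [u] := by rw [pvLoop.eq_def]; simp
        rw [this]; simp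
    · exfalso
      have h2 : 2 ≤ cs.length := by
        have : 1 ≤ cs.length := List.length_pos_iff.2 hne
        omega
      have hcnt : 2 ≤ pvCnt (cs.map (List.drop idx)) [] := by
        rw [pvCnt_nil]; simpa using h2
      obtain ⟨l, hl⟩ := List.exists_mem_of_ne_nil _ hne
      have hdrop : l.drop idx = [] := by
        rw [List.drop_eq_nil_iff]
        have := hlen l hl
        omega
      exact (hsafe [] (by intro k hk; simp at hk) hcnt).1 (List.mem_map.2 ⟨l, hl, hdrop⟩)
  | succ m ih =>
    intro cs idx fuel hi P hne hlo hlen hsafe hpre hfu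
    by_cases h1 : cs.length = 1
    · obtain ⟨u, rfl⟩ : ∃ u, cs = [u] := by
        cases cs with
        | nil => simp at h1
        | cons a t =>
          cases t with
          | nil => exact ⟨a, rfl⟩
          | cons b t2 => simp at h1
      refine ⟨u, ?_, ?_⟩
      · have hbits : pvRate hi (pvBuild ([u].map (List.drop idx))) = [] := by
          apply pvRate_small
          rw [pvTC_build]; simp
        rw [hbits, List.append_nil]
        have : (P.isPrefixOf u) = true := by
          rw [← hpre u (by simp), List.isPrefixOf_iff_prefix]
          exact List.take_prefix idx u
        simp [List.find?_cons, this]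
      · have : pvLoop hi fuel [u] idx = [u] := by rw [pvLoop.eq_def]; simp
        rw [this]; simp
    cases fuel with
    | zero => omega
    | succ f =>
      have h2 : 2 ≤ cs.length := by
        have : 1 ≤ cs.length := List.length_pos_iff.2 hne
        omega
      set ds := cs.map (List.drop idx) with hds
      have hpred : ∀ c : Char,
          (fun l : List Char => PySem.List.pyGet? l (idx : Int) == some c)
            = (fun l : List Char => (l.drop idx).head? == some c) := by
        intro c; funext l
        rw [PySem.List.pyGet?_natCast, ← List.head?_drop]
      have hcntP : ∀ c : Char,
          cs.countP (fun l => PySem.List.pyGet? l (idx : Int) == some c) = pvCnt ds [c] := by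
        intro c
        rw [hpred c, pvCnt_single, hds, List.countP_map]
        rfl
      have hcount : pvCount cs idx = (pvCnt ds ['1'], pvCnt ds ['0']) := by
        rw [pvCount_spec, hcntP '1', hcntP '0']
      have hroot : 2 ≤ pvCnt ds [] := by
        rw [pvCnt_nil, hds]; simpa using h2
      have hsafep := hsafe [] (by intro k hk; simp at hk) hroot
      have hTC : pvTC (pvBuild ds) = cs.length := by
        rw [pvTC_build, hds, List.length_map]
      have hC1 : pvTC (pvT1 (pvBuild ds)) = pvCnt ds ['1'] := by
        rw [pvT1_build, pvTC_build, List.length_map, ← List.countP_eq_length_filter,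
          pvCnt_single]
      have hC0 : pvTC (pvT0 (pvBuild ds)) = pvCnt ds ['0'] := by
        rw [pvT0_build, pvTC_build, List.length_map, ← List.countP_eq_length_filter,
          pvCnt_single]
      rcases htt : pvBuild ds with _ | ⟨c, t0, t1⟩
      · rw [htt] at hTC; simp [pvTC] at hTC; omega
      rw [htt] at hTC hC1 hC0
      simp only [pvT0, pvT1] at hC1 hC0
      have hT1 : t1 = pvBuild ((ds.filter (fun d => d.head? == some '1')).map List.tail) := by
        have := pvT1_build ds; rw [htt] at this; simpa [pvT1] using this
      have hT0 : t0 = pvBuild ((ds.filter (fun d => d.head? == some '0')).map List.tail) := by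
        have := pvT0_build ds; rw [htt] at this; simpa [pvT0] using this
      simp only [pvTC] at hTC
      -- one step of A's loop
      have hloop : pvLoop hi (f + 1) cs idx
          = pvLoop hi f
              (cs.filter (fun l =>
                PySem.List.pyGet? l (idx : Int) == some (pvMC hi (pvCount cs idx))))
              (idx + 1) := by
        rw [pvLoop.eq_def]; simp [h1]
      -- the shared step argument, for the selected bit mc = pvPick hi ds []
      have key : ∀ mc : Char, (mc = '0' ∨ mc = '1') →
          pvPick hi ds [] = mc →
          pvMC hi (pvCount cs idx) = mc →
          pvRate hi (PvTrie.mk c t0 t1)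
            = mc :: pvRate hi (pvBuild ((ds.filter (fun d => d.head? == some mc)).map
                List.tail)) →
          ∃ w, cs.find? (fun l =>
                  (P ++ pvRate hi (PvTrie.mk c t0 t1)).isPrefixOf l) = some w
            ∧ (pvLoop hi (f + 1) cs idx).flatten = w := by
        intro mc hmcb hmcp hmc hrate
        have hpos : 1 ≤ pvCnt ds [mc] := by
          have := hsafep.2
          rw [hmcp] at this
          simpa using this
        set cs' := cs.filter (fun l =>
          PySem.List.pyGet? l (idx : Int) == some mc) with hcs'
        have hlen' : cs'.length = pvCnt ds [mc] := by
          rw [hcs', ← List.countP_eq_length_filter, hcntP mc]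
        have hne' : cs' ≠ [] := by
          apply List.ne_nil_of_length_pos; omega
        have hsub : ∀ l ∈ cs', l ∈ cs := fun l hl => (List.mem_filter.1 hl).1
        have hget : ∀ l ∈ cs', l[idx]? = some mc := by
          intro l hl
          have hc := (List.mem_filter.1 hl).2
          have := beq_iff_eq.mp hc
          rwa [PySem.List.pyGet?_natCast] at this
        have hmap : cs'.map (List.drop (idx + 1))
            = (ds.filter (fun d => d.head? == some mc)).map List.tail := by
          rw [hds, List.filter_map, List.map_map, hcs']
          have hpf : ((fun d : List Char => d.head? == some mc) ∘ List.drop idx)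
              = (fun l : List Char => PySem.List.pyGet? l (idx : Int) == some mc) := by
            funext l
            simp only [Function.comp]
            rw [PySem.List.pyGet?_natCast, ← List.head?_drop]
          have htl : (List.tail ∘ List.drop idx)
              = (List.drop (idx + 1) : List Char → List Char) := by
            funext l; simp [List.tail_drop]
          rw [hpf, htl]
        obtain ⟨w, hfind, hflat⟩ := ih cs' (idx + 1) f hi (P ++ [mc]) hne'
          (by
            intro l hl
            obtain ⟨hlt, -⟩ := List.getElem?_eq_some_iff.1 (hget l hl)
            omega)
          (by intro l hl; have := hlen l (hsub l hl); omega)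
          (by
            rw [hmap]
            exact pvSafe_step hsafe hroot hmcp)
          (by
            intro l hl
            rw [List.take_succ, hpre l (hsub l hl), hget l hl]
            rfl)
          (by omega)
        rw [hmap] at hfind
        refine ⟨w, ?_, ?_⟩
        · -- lift the find? from the filtered list back to cs
          have hlift : (cs.filter (fun l =>
                PySem.List.pyGet? l (idx : Int) == some mc)).find?
                (fun l => ((P ++ [mc]) ++ pvRate hi (pvBuild
                  ((ds.filter (fun d => d.head? == some mc)).map List.tail))).isPrefixOf l)
              = cs.find?
                (fun l => ((P ++ [mc]) ++ pvRate hi (pvBuild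
                  ((ds.filter (fun d => d.head? == some mc)).map List.tail))).isPrefixOf l) := by
            apply pvFind_filter
            intro l hl hpfx
            rw [List.isPrefixOf_iff_prefix] at hpfx
            obtain ⟨r, hr⟩ := hpfx
            have hPlen : P.length = idx := by
              rw [← hpre l hl, List.length_take]
              have := hlo l hl
              omega
            have hl' : l = P ++ mc :: (pvRate hi (pvBuild
                ((ds.filter (fun d => d.head? == some mc)).map List.tail)) ++ r) := by
              rw [← hr]; simp
            have : PySem.List.pyGet? l (idx : Int) = some mc := by
              rw [hl', ← hPlen]
              exact PySem.List.pyGet?_append_length P _ mc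
            simp [this]
          rw [hrate]
          have hassoc : P ++ mc :: pvRate hi (pvBuild
              ((ds.filter (fun d => d.head? == some mc)).map List.tail))
            = (P ++ [mc]) ++ pvRate hi (pvBuild
              ((ds.filter (fun d => d.head? == some mc)).map List.tail)) := by simp
          rw [hassoc, ← hlift]
          exact hfind
        · rw [hloop, hmc, ← hcs', hflat]
      -- dispatch the four shapes of the selected bit
      by_cases hcc : pvCnt ds ['0'] ≤ pvCnt ds ['1']
      · cases hi with
        | true =>
          refine key '1' (Or.inr rfl) ?_ ?_ ?_
          · simp [pvPick, hcc]
          · rw [hcount]; simp [pvMC, hcc]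
          · have hgt : ¬ c ≤ 1 := by omega
            rw [pvRate, if_neg hgt, hC0, hC1, hT1]
            simp [hcc]
        | false =>
          refine key '0' (Or.inl rfl) ?_ ?_ ?_
          · simp [pvPick, hcc]
          · rw [hcount]; simp [pvMC, hcc]
          · have hgt : ¬ c ≤ 1 := by omega
            have hnlt : ¬ pvCnt ds ['1'] < pvCnt ds ['0'] := by omega
            rw [pvRate, if_neg hgt, hC0, hC1, hT0]
            simp [hnlt]
      · cases hi with
        | true =>
          refine key '0' (Or.inl rfl) ?_ ?_ ?_
          · simp [pvPick, hcc]
          · rw [hcount]; simp [pvMC, hcc]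
          · have hgt : ¬ c ≤ 1 := by omega
            rw [pvRate, if_neg hgt, hC0, hC1, hT0]
            simp [hcc]
        | false =>
          refine key '1' (Or.inr rfl) ?_ ?_ ?_
          · simp [pvPick, hcc]
          · rw [hcount]; simp [pvMC, hcc]
          · have hgt : ¬ c ≤ 1 := by omega
            have hlt : pvCnt ds ['1'] < pvCnt ds ['0'] := by omega
            rw [pvRate, if_neg hgt, hC0, hC1, hT1]
            simp [hlt]

-- ===== VERDICT (by name: the statement is the Claim_ definition above) =====
theorem part_two_spec : Claim_equal_part_two := by
  intro lines _ hpre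
  obtain ⟨hne, hsT, hsF, -, -⟩ := hpre
  unfold Spec_part_two part_two part_two_alt pvRateVal
  cases lines with
  | nil => exact absurd rfl hne
  | cons s rest =>
    set ls : List (List Char) := (s :: rest).map String.toList with hls
    have hlen : ∀ l ∈ ls, l.length ≤ 0 + (ls.map List.length).sum := by
      intro l hl
      have : l.length ∈ ls.map List.length := List.mem_map_of_mem hl
      have := List.single_le_sum (by intro x _; omega) _ this
      omega
    have hdrop0 : ls.map (List.drop 0) = ls := by
      have h : (List.drop 0 : List Char → List Char) = id := funext fun l => List.drop_zero
      rw [h, List.map_id]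
    have hsafe : ∀ hi : Bool, pvSafe hi (ls.map (List.drop 0)) := by
      intro hi
      rw [hdrop0]
      cases hi with
      | true => exact pvSafe_of_B hsT
      | false => exact pvSafe_of_B hsF
    have hmain : ∀ hi : Bool,
        (pvInt2? (pvLoop hi ((ls.map List.length).sum) ls 0).flatten).getD 0
          = (match ls.find? (fun l => (pvRate hi (pvBuild ls)).isPrefixOf l) with
             | some w => (pvInt2? w).getD 0
             | none => 0) := by
      intro hi
      obtain ⟨w, hfind, hflat⟩ := pv_main ((ls.map List.length).sum) ls 0
        ((ls.map List.length).sum) hi []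
        (by rw [hls]; simp) (by intro l _; omega) hlen (hsafe hi)
        (by intro l _; simp) (le_refl _)
      rw [hdrop0] at hfind
      rw [List.nil_append] at hfind
      rw [hflat, hfind]
    simp only [hmain true, hmain false]
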